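-- pv_equiv track=rewrite | github.com/im-jonathan/hackerRankProblemSolving | greedy/goodlandElectricity.py | pylons
-- ===== SOURCE A (Python) =====
-- def pylons(k: int, arr: list) -> int:
--     # Write your code here
--     n = len(arr)
--     start = 0
--     last_pylon = -1
--
--     total_pylons = 0
--     while(start < n):
--         furthest = min(start+k-1, n-1)
--
--         for i in range(furthest, last_pylon, -1):
--             if arr[i]:
--                 total_pylons += 1
--                 start = i+k
--                 last_pylon = i
--                 break
--         else:
--             return -1
--
--     return total_pylons
-- ===== SOURCE B (Python) =====
-- def pylons(k: int, arr: list) -> int: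
--     n = len(arr)
--     # nearest[i] = largest index j <= i with arr[j] truthy, or -1 if none
--     nearest = []
--     cur = -1
--     for i, v in enumerate(arr):
--         if v:
--             cur = i
--         nearest.append(cur)
--     count = 0
--     pos = 0
--     last = -1
--     while pos < n:
--         f = min(pos + k - 1, n - 1)
--         if f < 0:
--             return -1
--         j = nearest[f]
--         if j <= last:
--             return -1
--         count += 1
--         last = j
--         pos = j + k
--     return count
-- ===== Notes on version B (the rewrite author's own statement) =====
-- stated objective: alternative
-- what changed: B precomputes in one pass a nearest-powered-plant-at-or-before-each-index table and replaces A's per-step downward rescans (up to k cells each greedy step, O(n*k) worst case) with O(1) table lookups; on random inputs A's rescans are short, so no measured speed-up.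
import Mathlib
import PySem

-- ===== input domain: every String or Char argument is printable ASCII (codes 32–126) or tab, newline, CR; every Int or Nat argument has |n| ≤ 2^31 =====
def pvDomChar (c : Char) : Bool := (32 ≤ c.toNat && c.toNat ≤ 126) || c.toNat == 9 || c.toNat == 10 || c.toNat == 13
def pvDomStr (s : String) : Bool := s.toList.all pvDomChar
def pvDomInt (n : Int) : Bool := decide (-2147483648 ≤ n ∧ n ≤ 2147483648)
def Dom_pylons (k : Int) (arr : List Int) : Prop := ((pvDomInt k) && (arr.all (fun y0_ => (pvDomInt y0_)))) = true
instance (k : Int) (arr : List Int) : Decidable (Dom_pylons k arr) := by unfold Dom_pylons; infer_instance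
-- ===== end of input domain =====

-- B replaces A's per-step downward rescan by a one-pass nearest-powered-plant-at-or-before
-- table with O(1) lookups in the jump loop (objective: alternative algorithm, same measured cost).


-- ===== PORT A =====
-- the inner 'for i in range(furthest, last_pylon, -1): if arr[i]: break / else:' —
-- find the first truthy index in the countdown range (none = the for-else branch)
def pylonsFind (arr : List Int) : List Int → Option Int
  | [] => none
  | i :: rest => if (PySem.List.pyGet? arr i).getD 0 ≠ 0 then some i else pylonsFind arr rest

-- the while loop; fuel n+1 is enough since 'start' strictly increases every iteration
def pylonsLoop (k : Int) (arr : List Int) (n : Int) :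
    Nat → Int → Int → Int → Int
  | 0, _, _, _ => -1
  | fuel + 1, start, last_pylon, total_pylons =>
    if start < n then
      let furthest := min (start + k - 1) (n - 1)
      match pylonsFind arr (PySem.List.pyRange furthest last_pylon (-1)) with
      | some i => pylonsLoop k arr n fuel (i + k) i (total_pylons + 1)
      | none => -1
    else total_pylons

def pylons (k : Int) (arr : List Int) : Int :=
  pylonsLoop k arr (arr.length : Int) (arr.length + 1) 0 (-1) 0

-- ===== PORT B =====
-- 'for i, v in enumerate(arr): if v: cur = i; nearest.append(cur)'
def pylonsNearest : List Int → Int → Int → List Int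
  | [], _, _ => []
  | v :: rest, i, cur =>
    let cur' := if v ≠ 0 then i else cur
    cur' :: pylonsNearest rest (i + 1) cur'

def pylonsAltLoop (k : Int) (nearest : List Int) (n : Int) :
    Nat → Int → Int → Int → Int
  | 0, _, _, _ => -1
  | fuel + 1, pos, last, count =>
    if pos < n then
      let f := min (pos + k - 1) (n - 1)
      if f < 0 then -1
      else
        let j := (PySem.List.pyGet? nearest f).getD (-1)
        if j ≤ last then -1
        else pylonsAltLoop k nearest n fuel (j + k) j (count + 1)
    else count

def pylons_alt (k : Int) (arr : List Int) : Int :=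
  pylonsAltLoop k (pylonsNearest arr 0 (-1)) (arr.length : Int) (arr.length + 1) 0 (-1) 0

-- ===== PRECONDITION & SPEC =====
def Spec_pylons (k : Int) (arr : List Int) (out : Int) : Prop := out = pylons_alt k arr
instance (k : Int) (arr : List Int) (out : Int) : Decidable (Spec_pylons k arr out) := by unfold Spec_pylons; infer_instance

-- ===== CLAIM (what is proved, stated in full; the proofs are below) =====
def Claim_equal_pylons : Prop := ∀ (k : Int) (arr : List Int), Dom_pylons k arr → Spec_pylons k arr (pylons k arr)

-- ===== LEMMAS AND PROOFS =====

-- the value stored by pylonsNearest at offset f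
def nearVal (arr : List Int) (i cur : Int) (f : Nat) : Int :=
  match arr, f with
  | [], _ => cur
  | v :: _, 0 => if v ≠ 0 then i else cur
  | v :: rest, f + 1 => nearVal rest (i + 1) (if v ≠ 0 then i else cur) f

theorem pylonsNearest_get (arr : List Int) (i cur : Int) (f : Nat) (hf : f < arr.length) :
    (pylonsNearest arr i cur)[f]? = some (nearVal arr i cur f) := by
  induction arr generalizing i cur f with
  | nil => simp at hf
  | cons v rest ih =>
    cases f with
    | zero => simp [pylonsNearest, nearVal]
    | succ f =>
      simp only [pylonsNearest, nearVal, List.getElem?_cons_succ]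
      exact ih _ _ f (by simpa using hf)

theorem nearVal_le (arr : List Int) (i cur : Int) (f : Nat) (hcur : cur ≤ i - 1) :
    nearVal arr i cur f ≤ i + f := by
  induction arr generalizing i cur f with
  | nil => simp [nearVal]; omega
  | cons v rest ih =>
    cases f with
    | zero => simp only [nearVal]; split <;> omega
    | succ f =>
      simp only [nearVal]
      have := ih (i + 1) (if v ≠ 0 then i else cur) f (by split <;> omega)
      omega

theorem nearVal_succ (arr : List Int) (i cur : Int) (f : Nat) (hf : f + 1 < arr.length) :
    nearVal arr i cur (f + 1)
      = if arr[f + 1] ≠ 0 then i + (f + 1) else nearVal arr i cur f := by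
  induction arr generalizing i cur f with
  | nil => simp at hf
  | cons v rest ih =>
    cases f with
    | zero =>
      have h0 : 0 < rest.length := by simpa using hf
      simp only [nearVal, List.getElem_cons_succ]
      rw [show (nearVal rest (i+1) (if v ≠ 0 then i else cur) 0)
            = if rest[0] ≠ 0 then i + 1 else (if v ≠ 0 then i else cur) from by
            cases rest with
            | nil => simp at h0
            | cons w ws => rfl]
      split_ifs <;> simp
    | succ f =>
      simp only [nearVal, List.getElem_cons_succ]
      rw [ih (i+1) _ f (by simpa using hf)]
      split <;> [skip; rfl]
      omega

-- A's countdown scan equals a test against the nearest-table value: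
-- scanning down from f to last+1 for the first truthy cell finds exactly the largest
-- truthy index ≤ f (= nearVal) when it exceeds last, and nothing otherwise.
theorem find_eq_near (arr : List Int) (last : Int) (f : Nat) (hf : f < arr.length)
    (hlast : -1 ≤ last) :
    pylonsFind arr (PySem.List.pyRange (f : Int) last (-1))
      = (if last < nearVal arr 0 (-1) f then some (nearVal arr 0 (-1) f) else none) := by
  induction f generalizing last with
  | zero =>
    rcases lt_or_ge last 0 with hneg | hpos
    · have hlast0 : last = -1 := by omega
      subst hlast0
      rw [show ((0 : Nat) : Int) = 0 from rfl, PySem.List.pyRange_neg_one_cons (by norm_num)]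
      rw [show (0 : Int) - 1 = -1 from by norm_num, PySem.List.pyRange_neg_one_eq_nil le_rfl]
      cases arr with
      | nil => simp at hf
      | cons v rest =>
        simp only [pylonsFind, nearVal, PySem.List.pyGet?_zero_cons, Option.getD_some]
        split_ifs with h1 h2 <;> simp_all
    · rw [PySem.List.pyRange_neg_one_eq_nil (by omega)]
      have := nearVal_le arr 0 (-1) 0 (by norm_num)
      simp only [pylonsFind]
      rw [if_neg (by omega)]
  | succ f ih =>
    rcases lt_or_ge last ((f : Int) + 1) with hgt | hle
    case inr =>
      rw [show ((f + 1 : Nat) : Int) = (f : Int) + 1 from by push_cast; ring,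
        PySem.List.pyRange_neg_one_eq_nil hle,
        show pylonsFind arr [] = none from rfl]
      have := nearVal_le arr 0 (-1) (f + 1) (by norm_num)
      rw [if_neg (by push_cast at this; omega)]
    case inl =>
      rw [show ((f + 1 : Nat) : Int) = (f : Int) + 1 from by push_cast; ring,
        PySem.List.pyRange_neg_one_cons (by omega)]
      rw [show (f : Int) + 1 - 1 = (f : Int) from by ring]
      rw [nearVal_succ arr 0 (-1) f hf]
      simp only [pylonsFind]
      rw [show PySem.List.pyGet? arr ((f : Int) + 1) = some arr[f + 1] from by
            rw [show ((f : Int) + 1) = ((f + 1 : Nat) : Int) from by push_cast; ring,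
              PySem.List.pyGet?_natCast]
            simp [hf]]
      by_cases htr : arr[f + 1] ≠ 0
      · rw [if_pos (by simpa using htr), if_pos htr, if_pos (by omega)]
        norm_num
      · rw [if_neg (by simpa using htr), if_neg htr]
        exact ih last (by omega) hlast

-- both loops run in lockstep on the same state
theorem loops_eq (k : Int) (arr : List Int) (fuel : Nat) :
    ∀ start last total, -1 ≤ last →
      pylonsLoop k arr (arr.length : Int) fuel start last total
        = pylonsAltLoop k (pylonsNearest arr 0 (-1)) (arr.length : Int) fuel start last total := by
  induction fuel with
  | zero => intro start last total _; rfl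
  | succ fuel ih =>
    intro start last total hlast
    simp only [pylonsLoop, pylonsAltLoop]
    split
    case isFalse => rfl
    case isTrue hlt =>
      set f := min (start + k - 1) ((arr.length : Int) - 1) with hfdef
      rcases lt_or_ge f 0 with hneg | hnn
      · -- f < 0: the countdown range is empty on A's side, B returns -1 directly
        rw [if_pos hneg, PySem.List.pyRange_neg_one_eq_nil (by omega)]
        rfl
      · rw [if_neg (by omega)]
        have hflt : f < (arr.length : Int) := by omega
        have hfnat : f = ((f.toNat : Nat) : Int) := by omega
        have hfl : f.toNat < arr.length := by omega
        rw [hfnat, find_eq_near arr last f.toNat hfl hlast]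
        rw [show PySem.List.pyGet? (pylonsNearest arr 0 (-1)) ((f.toNat : Nat) : Int)
              = some (nearVal arr 0 (-1) f.toNat) from by
              rw [PySem.List.pyGet?_natCast]
              exact pylonsNearest_get arr 0 (-1) f.toNat hfl]
        simp only [Option.getD_some]
        by_cases hgt : last < nearVal arr 0 (-1) f.toNat
        · rw [if_pos hgt, if_neg (by omega)]
          exact ih _ _ _ (by omega)
        · rw [if_neg hgt, if_pos (by omega)]

-- ===== VERDICT (by name: the statement is the Claim_ definition above) =====
theorem pylons_spec : Claim_equal_pylons := by
  intro k arr _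
  unfold Spec_pylons pylons pylons_alt
  exact loops_eq k arr _ 0 (-1) 0 (by norm_num)
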